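-- pv_equiv track=rewrite | github.com/grasp-technologies/grasp-agents | src/grasp_agents/tools/file_edit/fuzzy_match.py | _find_block_matches
-- ===== SOURCE A (Python) =====
-- def _calculate_line_positions(
--     content_lines: list[str],
--     start_line: int,
--     end_line: int,
--     content_length: int,
-- ) -> tuple[int, int]:
--     """Translate ``(start_line, end_line)`` to character offsets in the original."""
--     start_pos = sum(len(line) + 1 for line in content_lines[:start_line])
--     end_pos = sum(len(line) + 1 for line in content_lines[:end_line]) - 1
--     end_pos = min(content_length, end_pos)
--     return start_pos, end_pos
--
-- def _find_block_matches(
--     content_lines: list[str],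
--     content_normalized_lines: list[str],
--     pattern_normalized: str,
--     content_length: int,
-- ) -> list[tuple[int, int]]:
--     """Scan the normalized content for a block equal to ``pattern_normalized``."""
--     pattern_norm_lines = pattern_normalized.split("\n")
--     num_pattern_lines = len(pattern_norm_lines)
--
--     matches: list[tuple[int, int]] = []
--     for i in range(len(content_normalized_lines) - num_pattern_lines + 1):
--         block = "\n".join(content_normalized_lines[i : i + num_pattern_lines])
--         if block == pattern_normalized:
--             start_pos, end_pos = _calculate_line_positions(
--                 content_lines, i, i + num_pattern_lines, content_length
--             )
--             matches.append((start_pos, end_pos))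
--     return matches
-- ===== SOURCE B (Python) =====
-- def _find_block_matches(
--     content_lines: list[str],
--     content_normalized_lines: list[str],
--     pattern_normalized: str,
--     content_length: int,
-- ) -> list[tuple[int, int]]:
--     """Scan the normalized content for a block equal to ``pattern_normalized``."""
--     pattern_norm_lines = pattern_normalized.split("\n")
--     num_pattern_lines = len(pattern_norm_lines)
--     first_line = pattern_norm_lines[0]
--     rest_lines = pattern_norm_lines[1:]
--
--     # cumulative character offsets: prefix[j] = total length of the first j lines plus j newlines
--     prefix = [0]
--     for line in content_lines:
--         prefix.append(prefix[-1] + len(line) + 1)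
--     n = len(content_lines)
--
--     matches: list[tuple[int, int]] = []
--     for i in range(len(content_normalized_lines) - num_pattern_lines + 1):
--         if (
--             content_normalized_lines[i] == first_line
--             and content_normalized_lines[i + 1 : i + num_pattern_lines] == rest_lines
--         ):
--             start_pos = prefix[min(i, n)]
--             end_pos = min(content_length, prefix[min(i + num_pattern_lines, n)] - 1)
--             matches.append((start_pos, end_pos))
--     return matches
-- ===== Notes on version B (the rewrite author's own statement) =====
-- stated objective: alternative
-- what changed: Replaces the per-window "\n"-join-and-compare plus per-match offset re-summation by a once-built cumulative line-length prefix list (constant-time offset lookup per match) and a head-line check followed by a window-of-lines comparison.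
import Mathlib
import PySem

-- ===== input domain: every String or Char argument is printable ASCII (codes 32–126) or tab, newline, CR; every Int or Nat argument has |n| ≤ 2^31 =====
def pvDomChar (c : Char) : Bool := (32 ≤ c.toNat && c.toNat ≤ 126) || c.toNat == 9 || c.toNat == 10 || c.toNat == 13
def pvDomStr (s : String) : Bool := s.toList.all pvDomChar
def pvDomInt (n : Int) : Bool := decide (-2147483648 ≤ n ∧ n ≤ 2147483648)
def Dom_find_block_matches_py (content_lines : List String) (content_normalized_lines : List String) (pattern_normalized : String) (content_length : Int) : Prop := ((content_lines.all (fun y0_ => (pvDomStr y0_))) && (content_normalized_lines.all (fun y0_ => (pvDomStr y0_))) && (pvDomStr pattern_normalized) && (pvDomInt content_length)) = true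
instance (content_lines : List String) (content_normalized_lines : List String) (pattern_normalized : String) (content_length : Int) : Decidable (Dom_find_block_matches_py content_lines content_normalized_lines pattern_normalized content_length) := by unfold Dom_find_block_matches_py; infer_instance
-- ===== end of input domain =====

-- B replaces A's per-window "\n"-join + per-match offset re-summation by a once-built
-- cumulative line-length prefix list and a head-line check followed by a window-of-lines
-- comparison (objective: alternative).

-- ===== PORT A =====
-- helper: _calculate_line_positions (sum over content_lines[:k] transliterated as map+sum)
def pvCalcLinePositions (content_lines : List String) (start_line : Int) (end_line : Int) (content_length : Int) : Int × Int :=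
  let start_pos := ((PySem.List.slice content_lines none (some start_line)).map (fun line => PySem.Str.len line + 1)).sum
  let end_pos := ((PySem.List.slice content_lines none (some end_line)).map (fun line => PySem.Str.len line + 1)).sum - 1
  (start_pos, min content_length end_pos)

def find_block_matches_py (content_lines : List String) (content_normalized_lines : List String) (pattern_normalized : String) (content_length : Int) : List (Int × Int) :=
  let pattern_norm_lines := PySem.Chars.splitOn pattern_normalized.toList ['\n']
  let num : Int := pattern_norm_lines.length
  (PySem.List.pyRange 0 ((content_normalized_lines.length : Int) - num + 1) 1).foldl
    (fun ms i =>
      let block := PySem.Chars.join ['\n']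
        ((PySem.List.slice content_normalized_lines (some i) (some (i + num))).map String.toList)
      if block = pattern_normalized.toList then
        ms ++ [pvCalcLinePositions content_lines i (i + num) content_length]
      else ms) []

-- ===== PORT B =====
def find_block_matches_py_alt (content_lines : List String) (content_normalized_lines : List String) (pattern_normalized : String) (content_length : Int) : List (Int × Int) :=
  let pattern_norm_lines := PySem.Chars.splitOn pattern_normalized.toList ['\n']
  let num : Int := pattern_norm_lines.length
  -- pattern_norm_lines[0] ported via pyGet?+getD (exact: split never returns an empty list)
  let first_line := (PySem.List.pyGet? pattern_norm_lines 0).getD []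
  let rest_lines := PySem.List.slice pattern_norm_lines (some 1) none
  -- prefix[-1] is ported as getLast?.getD 0 (exact: the list starts as [0] and only grows);
  -- prefix[min(i, n)] / prefix[min(i+num, n)] are in-range non-negative indices, ported as getD
  let pref := content_lines.foldl
    (fun pr line => pr ++ [(pr.getLast?.getD 0) + PySem.Str.len line + 1]) [(0 : Int)]
  let n : Int := content_lines.length
  (PySem.List.pyRange 0 ((content_normalized_lines.length : Int) - num + 1) 1).foldl
    (fun ms i =>
      if (PySem.List.pyGet? content_normalized_lines i).map String.toList = some first_line
          ∧ (PySem.List.slice content_normalized_lines (some (i + 1)) (some (i + num))).map String.toList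
            = rest_lines then
        ms ++ [(pref.getD (min i n).toNat 0,
                     min content_length (pref.getD (min (i + num) n).toNat 0 - 1))]
      else ms) []

-- ===== PRECONDITION & SPEC =====
def Spec_find_block_matches_py (content_lines : List String) (content_normalized_lines : List String) (pattern_normalized : String) (content_length : Int) (out : List (Int × Int)) : Prop := out = find_block_matches_py_alt content_lines content_normalized_lines pattern_normalized content_length
instance (content_lines : List String) (content_normalized_lines : List String) (pattern_normalized : String) (content_length : Int) (out : List (Int × Int)) : Decidable (Spec_find_block_matches_py content_lines content_normalized_lines pattern_normalized content_length out) := by unfold Spec_find_block_matches_py; infer_instance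

-- ===== CLAIM (what is proved, stated in full; the proofs are below) =====
def Claim_equal_find_block_matches_py : Prop := ∀ (content_lines : List String) (content_normalized_lines : List String) (pattern_normalized : String) (content_length : Int), Dom_find_block_matches_py content_lines content_normalized_lines pattern_normalized content_length → Spec_find_block_matches_py content_lines content_normalized_lines pattern_normalized content_length (find_block_matches_py content_lines content_normalized_lines pattern_normalized content_length)

-- ===== LEMMAS AND PROOFS =====

theorem pv_splitOn_go_single (c : Char) : ∀ (fuel : Nat) (l cur : List Char) (acc : List (List Char)), l.length ≤ fuel →
    PySem.Chars.splitOn.go [c] fuel l cur acc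
      = acc.reverse ++ List.splitOnP.go (· == c) l cur := by
  intro fuel
  induction fuel with
  | zero =>
    intro l cur acc h
    have : l = [] := by cases l <;> simp_all
    subst this
    simp [PySem.Chars.splitOn.go, List.splitOnP.go]
  | succ n ih =>
    intro l cur acc h
    cases l with
    | nil => simp [PySem.Chars.splitOn.go, List.splitOnP.go]
    | cons x rest =>
      rw [PySem.Chars.splitOn.go]
      by_cases hx : x = c
      · subst hx
        have hpre : [x].isPrefixOf (x :: rest) = true := by simp [List.isPrefixOf]
        rw [if_pos hpre]
        simp only [List.length_cons] at h
        rw [ih _ _ _ (by simpa using Nat.le_of_succ_le_succ h)]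
        simp [List.splitOnP.go, List.splitOnP.go_acc]
      · have hpre : [c].isPrefixOf (x :: rest) = false := by
          simp [List.isPrefixOf, Ne.symm hx]
        rw [if_neg (by simp [hpre])]
        simp only [List.length_cons] at h
        rw [ih _ _ _ (Nat.le_of_succ_le_succ h)]
        simp [List.splitOnP.go, hx]

theorem pv_chars_splitOn_single (s : List Char) (c : Char) :
    PySem.Chars.splitOn s [c] = s.splitOn c := by
  rw [PySem.Chars.splitOn, pv_splitOn_go_single c (s.length+1) s [] [] (by omega)]
  rfl

theorem pv_splitOn_not_mem (c : Char) (s : List Char) :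
    ∀ part ∈ s.splitOn c, c ∉ part := by
  induction s with
  | nil => simp [List.splitOn]
  | cons x rest ih =>
    simp only [List.splitOn] at *
    rw [List.splitOnP_cons]
    by_cases hx : x = c
    · subst hx; simp; exact fun p hp => ih p hp
    · simp [hx]
      obtain ⟨hd, tl, heq⟩ := List.exists_cons_of_ne_nil (List.splitOnP_ne_nil (· == c) rest)
      rw [heq]
      intro p hp
      simp [List.modifyHead] at hp
      rcases hp with h1 | h2
      · subst h1
        have := ih hd (by rw [heq]; simp)
        simp [this]
        exact fun h => hx h.symm
      · exact ih p (by rw [heq]; simp [h2])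

theorem pv_count_intercalate (c : Char) : ∀ (ls : List (List Char)), ls ≠ [] →
    List.count c ([c].intercalate ls) = (ls.length - 1) + (ls.map (List.count c)).sum := by
  intro ls
  induction ls with
  | nil => simp
  | cons hd tl ih =>
    intro _
    cases tl with
    | nil => simp [List.intercalate]
    | cons a b =>
      have : [c].intercalate (hd :: a :: b) = hd ++ [c] ++ [c].intercalate (a :: b) := by
        simpa [PySem.Chars.join] using PySem.Chars.join_cons_cons [c] hd a b
      rw [this]
      simp only [List.count_append, ih (by simp)]
      simp
      omega

theorem pv_join_eq_iff (c : Char) (ws ps : List (List Char))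
    (hlen : ws.length = ps.length) (hps : ∀ l ∈ ps, c ∉ l) (hne : ps ≠ []) :
    ([c].intercalate ws = [c].intercalate ps ↔ ws = ps) := by
  constructor
  · intro h
    have hwne : ws ≠ [] := by
      intro hw; subst hw; simp at hlen; exact hne (List.eq_nil_of_length_eq_zero hlen.symm)
    have hcnt := pv_count_intercalate c ws hwne
    have hcnt2 := pv_count_intercalate c ps hne
    rw [h, hcnt2] at hcnt
    have hzero : ∀ l ∈ ps, List.count c l = 0 := fun l hl => List.count_eq_zero.2 (hps l hl)
    have hsum2 : ((ps.map (List.count c)).sum) = 0 := by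
      apply List.sum_eq_zero; intro x hx
      simp only [List.mem_map] at hx
      obtain ⟨l, hl, rfl⟩ := hx; exact hzero l hl
    have hsum1 : ((ws.map (List.count c)).sum) = 0 := by omega
    have hwfree : ∀ l ∈ ws, c ∉ l := by
      intro l hl
      have h0 : List.count c l = 0 :=
        List.sum_eq_zero_iff.mp hsum1 _ (List.mem_map_of_mem hl)
      exact List.count_eq_zero.1 h0
    have e1 := List.splitOn_intercalate ws c hwfree hwne
    have e2 := List.splitOn_intercalate ps c hps hne
    rw [← e1, ← e2, h]
  · intro h; rw [h]

def pvTail (a : Int) : List String → List Int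
  | [] => []
  | line :: rest => (a + PySem.Str.len line + 1) :: pvTail (a + PySem.Str.len line + 1) rest

theorem pv_pref_fold : ∀ (cl : List String) (pr : List Int), pr ≠ [] →
    cl.foldl (fun pr line => pr ++ [(pr.getLast?.getD 0) + PySem.Str.len line + 1]) pr
      = pr ++ pvTail (pr.getLast?.getD 0) cl := by
  intro cl
  induction cl with
  | nil => intro pr _; simp [pvTail]
  | cons line rest ih =>
    intro pr hpr
    simp only [List.foldl_cons]
    rw [ih _ (by simp)]
    have hlast : ((pr ++ [pr.getLast?.getD 0 + PySem.Str.len line + 1]).getLast?.getD 0)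
        = pr.getLast?.getD 0 + PySem.Str.len line + 1 := by
      simp [List.getLast?_append]
    rw [hlast]
    simp [pvTail]

theorem pv_tail_getD : ∀ (cl : List String) (a : Int) (j : Nat), j ≤ cl.length →
    ((a :: pvTail a cl).getD j 0)
      = a + ((cl.take j).map (fun line => PySem.Str.len line + 1)).sum := by
  intro cl
  induction cl with
  | nil =>
    intro a j h
    have hj : j = 0 := Nat.le_zero.mp h
    subst hj; simp [pvTail]
  | cons line rest ih =>
    intro a j h
    cases j with
    | zero => simp
    | succ k =>
      simp only [pvTail, List.getD_cons_succ, List.take_succ_cons, List.map_cons, List.sum_cons]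
      have := ih (a + PySem.Str.len line + 1) k (by simpa using Nat.le_of_succ_le_succ h)
      rw [this]
      ring
-- ===== VERDICT (by name: the statement is the Claim_ definition above) =====
theorem find_block_matches_py_spec : Claim_equal_find_block_matches_py := by
  intro cl cnl p L _
  unfold Spec_find_block_matches_py find_block_matches_py find_block_matches_py_alt
  apply PySem.List.foldl_congr_mem'
  intro i hi acc
  rw [PySem.List.mem_pyRange_one] at hi
  obtain ⟨hi0, hi1⟩ := hi
  rw [pv_chars_splitOn_single p.toList '\n'] at *
  have hne : p.toList.splitOn '\n' ≠ [] := List.splitOnP_ne_nil _ _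
  have hnum0 : (0:Int) ≤ (p.toList.splitOn '\n').length := by positivity
  -- the window of lines, as char lists
  have hslice : PySem.List.slice cnl (some i) (some (i + ((p.toList.splitOn '\n').length : Int)))
      = (cnl.drop i.toNat).take (p.toList.splitOn '\n').length := by
    rw [PySem.List.slice_toNat cnl hi0 (by omega)]
    congr 1
    omega
  have hlen : ((PySem.List.slice cnl (some i) (some (i + ((p.toList.splitOn '\n').length : Int)))).map String.toList).length
      = (p.toList.splitOn '\n').length := by
    rw [hslice]
    simp
    omega
  -- guard equivalence
  have hguard0 : ∀ (ws : List (List Char)), ws.length = (p.toList.splitOn '\n').length →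
      ((PySem.Chars.join ['\n'] ws = p.toList) ↔ (ws = p.toList.splitOn '\n')) := by
    intro ws hl
    conv_lhs => rw [← List.intercalate_splitOn p.toList '\n']
    simp only [PySem.Chars.join]
    exact pv_join_eq_iff '\n' _ _ hl (pv_splitOn_not_mem '\n' p.toList) hne
  have hguard := hguard0 _ hlen
  -- the prefix list
  have hpref : cl.foldl (fun pr line => pr ++ [pr.getLast?.getD 0 + PySem.Str.len line + 1]) [0]
      = (0:Int) :: pvTail 0 cl := by
    rw [pv_pref_fold cl [0] (by simp)]
    simp
  -- positions
  have hpos : ∀ (k : Int), 0 ≤ k →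
      ((cl.foldl (fun pr line => pr ++ [pr.getLast?.getD 0 + PySem.Str.len line + 1]) [0]).getD
          (min k (cl.length:Int)).toNat 0)
        = ((PySem.List.slice cl none (some k)).map (fun line => PySem.Str.len line + 1)).sum := by
    intro k hk
    rw [hpref, PySem.List.slice_to cl hk]
    have hj : (min k (cl.length:Int)).toNat = min k.toNat cl.length := by omega
    rw [hj, pv_tail_getD cl 0 (min k.toNat cl.length) (by omega)]
    rw [← List.take_eq_take_min]
    ring
  -- B's head-plus-rest test is the same window comparison
  have hk1 : 1 ≤ (p.toList.splitOn '\n').length := List.length_pos_of_ne_nil hne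
  have hNlen : i.toNat + (p.toList.splitOn '\n').length ≤ cnl.length := by omega
  have hjlt : i.toNat < cnl.length := by omega
  have hicast : i = (i.toNat : Int) := by omega
  obtain ⟨ph, pt, hpe⟩ := List.exists_cons_of_ne_nil hne
  have hfirst : (PySem.List.pyGet? (p.toList.splitOn '\n') 0).getD [] = ph := by
    rw [hpe]; simp
  have hrestp : PySem.List.slice (p.toList.splitOn '\n') (some 1) none = pt := by
    rw [PySem.List.slice_from_one, hpe]; simp
  have hwcons : (PySem.List.slice cnl (some i) (some (i + ((p.toList.splitOn '\n').length : Int)))).map String.toList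
      = cnl[i.toNat].toList
        :: ((cnl.drop (i.toNat + 1)).take ((p.toList.splitOn '\n').length - 1)).map String.toList := by
    rw [hslice, List.drop_eq_getElem_cons hjlt]
    obtain ⟨m, hm⟩ : ∃ m, (p.toList.splitOn '\n').length = m + 1 :=
      ⟨(p.toList.splitOn '\n').length - 1, by omega⟩
    rw [hm]
    simp
    rw [List.drop_eq_getElem_cons (show i.toNat < (List.map String.toList cnl).length by simpa using hjlt)]
    simp
  have hrslice : PySem.List.slice cnl (some (i + 1)) (some (i + ((p.toList.splitOn '\n').length : Int)))
      = (cnl.drop (i.toNat + 1)).take ((p.toList.splitOn '\n').length - 1) := by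
    rw [PySem.List.slice_toNat cnl (by omega) (by omega)]
    have h1 : (i + 1).toNat = i.toNat + 1 := by omega
    have h2 : (i + ((p.toList.splitOn '\n').length : Int)).toNat
        = i.toNat + (p.toList.splitOn '\n').length := by omega
    rw [h1, h2]
    congr 1
    omega
  have hget : PySem.List.pyGet? cnl i = some cnl[i.toNat] := by
    have h := PySem.List.pyGet?_natCast cnl i.toNat
    rw [← hicast] at h
    rw [h, List.getElem?_eq_getElem hjlt]
  have hBiff : ((PySem.List.slice cnl (some i) (some (i + ((p.toList.splitOn '\n').length : Int)))).map String.toList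
        = p.toList.splitOn '\n')
      ↔ ((PySem.List.pyGet? cnl i).map String.toList
            = some ((PySem.List.pyGet? (p.toList.splitOn '\n') 0).getD [])
          ∧ (PySem.List.slice cnl (some (i + 1)) (some (i + ((p.toList.splitOn '\n').length : Int)))).map String.toList
            = PySem.List.slice (p.toList.splitOn '\n') (some 1) none) := by
    rw [hwcons, hget, hfirst, hrestp, hrslice, hpe]
    simp
  rw [if_congr (hguard.trans hBiff) rfl rfl]
  by_cases hb : ((PySem.List.pyGet? cnl i).map String.toList
            = some ((PySem.List.pyGet? (p.toList.splitOn '\n') 0).getD [])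
          ∧ (PySem.List.slice cnl (some (i + 1)) (some (i + ((p.toList.splitOn '\n').length : Int)))).map String.toList
            = PySem.List.slice (p.toList.splitOn '\n') (some 1) none)
  · rw [if_pos hb, if_pos hb]
    simp only [pvCalcLinePositions]
    rw [hpos i hi0, hpos (i + ((p.toList.splitOn '\n').length : Int)) (by omega)]
  · rw [if_neg hb, if_neg hb]
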